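-- pv_equiv track=rewrite | github.com/tommotom/LeetCode | Contest/Weekly-Contest-324/4.py | cycleLengthQueries
-- ===== SOURCE A (Python) =====
-- from typing import List
--
-- def cycleLengthQueries(n: int, queries: List[List[int]]) -> List[int]:
--     ans = []
--     for a, b in queries:
--         tmp = 1
--         while a != b:
--             tmp += 1
--             if a > b:
--                 a //= 2
--             else:
--                 b //= 2
--         ans.append(tmp)
--
--     return ans
-- ===== SOURCE B (Python) =====
-- from typing import List
--
-- def cycleLengthQueries(n: int, queries: List[List[int]]) -> List[int]:
--     res = []
--     for q in queries:
--         a, b = q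
--         da, db = a.bit_length(), b.bit_length()
--         if da > db:
--             d = da - db
--             for _ in range(d):
--                 a >>= 1
--         else:
--             d = db - da
--             for _ in range(d):
--                 b >>= 1
--         steps = 0
--         while a != b:
--             a >>= 1
--             b >>= 1
--             steps += 1
--         res.append(d + 2 * steps + 1)
--     return res
-- ===== Notes on version B (the rewrite author's own statement) =====
-- stated objective: alternative
-- what changed: Replaces A's single interleaved compare-larger-and-halve loop by a two-phase structure: precompute both depths with bit_length(), align the deeper node by halving it depth-difference times, then ascend both nodes jointly until they meet; answer is d + 2*steps + 1.
-- outside the precondition, e.g. on cycleLengthQueries(0, [[-1, -2]]): A does not finish within the time limit, B returns [2]; on cycleLengthQueries(0, [[1, 2, 3]]): A raises ValueError, B raises ValueError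
import Mathlib
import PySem

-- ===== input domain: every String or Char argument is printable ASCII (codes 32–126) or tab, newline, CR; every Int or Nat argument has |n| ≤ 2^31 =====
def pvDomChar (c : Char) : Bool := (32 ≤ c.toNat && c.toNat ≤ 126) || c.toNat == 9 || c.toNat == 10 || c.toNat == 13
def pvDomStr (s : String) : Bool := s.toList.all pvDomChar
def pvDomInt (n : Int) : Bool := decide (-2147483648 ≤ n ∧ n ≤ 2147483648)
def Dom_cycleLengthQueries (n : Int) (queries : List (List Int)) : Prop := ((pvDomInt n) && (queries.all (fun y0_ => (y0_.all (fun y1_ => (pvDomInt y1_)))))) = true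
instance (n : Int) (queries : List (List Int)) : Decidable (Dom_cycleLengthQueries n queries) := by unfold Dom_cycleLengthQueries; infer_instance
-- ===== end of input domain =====

-- B replaces A's interleaved compare-and-halve loop by precomputing depths with bit_length(),
-- aligning the deeper node, then ascending both jointly; objective: alternative decomposition.

-- ===== PORT A =====
-- A's while loop, with fuel making the (possibly diverging) loop total; fuel is generous
-- under Pre_ (both entries nonnegative) and the fuel-out branch is unreachable there.
def pvLoopA (a b tmp : Int) : Nat → Int
  | 0 => tmp
  | f + 1 =>
    if a = b then tmp
    else if a > b then pvLoopA (PySem.Int.floordiv a 2) b (tmp + 1) f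
    else pvLoopA a (PySem.Int.floordiv b 2) (tmp + 1) f

-- the body of A's for-loop for one query; a non-pair query raises in Python (excluded by Pre_)
def pvGoA (q : List Int) : Int :=
  match q with
  | [a, b] => pvLoopA a b 1 (a.natAbs + b.natAbs + 1)
  | _ => 0

def cycleLengthQueries (n : Int) (queries : List (List Int)) : List Int :=
  queries.foldl (fun ans q => ans ++ [pvGoA q]) []

-- ===== PORT B =====
-- 'for _ in range(k): a >>= 1'
def pvShiftDown (a : Int) : Nat → Int
  | 0 => a
  | k + 1 => pvShiftDown (a >>> 1) k

-- B's joint-ascend while loop, fueled the same way as A's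
def pvLoopB (a b steps : Int) : Nat → Int
  | 0 => steps
  | f + 1 =>
    if a = b then steps
    else pvLoopB (a >>> 1) (b >>> 1) (steps + 1) f

def pvGoB (q : List Int) : Int :=
  match q with
  | [a, b] =>
    if PySem.Int.bitLength a > PySem.Int.bitLength b then
      ((PySem.Int.bitLength a - PySem.Int.bitLength b : Nat) : Int)
        + 2 * pvLoopB (pvShiftDown a (PySem.Int.bitLength a - PySem.Int.bitLength b)) b 0
            (a.natAbs + b.natAbs + 1) + 1
    else
      ((PySem.Int.bitLength b - PySem.Int.bitLength a : Nat) : Int)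
        + 2 * pvLoopB a (pvShiftDown b (PySem.Int.bitLength b - PySem.Int.bitLength a)) 0
            (a.natAbs + b.natAbs + 1) + 1
  | _ => 0

def cycleLengthQueries_alt (n : Int) (queries : List (List Int)) : List Int :=
  queries.map pvGoB

-- ===== PRECONDITION & SPEC =====
-- Pre_ excludes queries that are not pairs (Python's unpacking raises ValueError in both A and B)
-- and queries with a negative entry, on which A's floor-halving loop can diverge (e.g. [-1, -2]).
def Pre_cycleLengthQueries (n : Int) (queries : List (List Int)) : Prop :=
  ∀ q ∈ queries, q.length = 2 ∧ ∀ x ∈ q, 0 ≤ x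
instance (n : Int) (queries : List (List Int)) : Decidable (Pre_cycleLengthQueries n queries) := by
  unfold Pre_cycleLengthQueries; infer_instance

def pvWitness_cycleLengthQueries : Int × List (List Int) := (4, [[3, 7], [2, 2], [0, 5]])

def Spec_cycleLengthQueries (n : Int) (queries : List (List Int)) (out : List Int) : Prop := out = cycleLengthQueries_alt n queries
instance (n : Int) (queries : List (List Int)) (out : List Int) : Decidable (Spec_cycleLengthQueries n queries out) := by unfold Spec_cycleLengthQueries; infer_instance

-- ===== CLAIM (what is proved, stated in full; the proofs are below) =====
def Claim_equal_cycleLengthQueries : Prop := ∀ (n : Int) (queries : List (List Int)), Dom_cycleLengthQueries n queries → Pre_cycleLengthQueries n queries → Spec_cycleLengthQueries n queries (cycleLengthQueries n queries)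

-- ===== LEMMAS AND PROOFS =====

-- Nat-level characterisations of the two loops
def pvDistN : Nat → Nat → Nat
  | a, b =>
    if h : a = b then 0
    else if hb : b < a then pvDistN (a / 2) b + 1
    else pvDistN a (b / 2) + 1
  termination_by a b => a + b
  decreasing_by
  · have : a / 2 < a := Nat.div_lt_self (by omega) (by omega)
    omega
  · have : b / 2 < b := Nat.div_lt_self (by omega) (by omega)
    omega

def pvJDistN : Nat → Nat → Nat
  | a, b =>
    if h : a = b then 0
    else pvJDistN (a / 2) (b / 2) + 1
  termination_by a b => a + b
  decreasing_by
    have h2 : a / 2 ≤ a := Nat.div_le_self _ _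
    have h3 : b / 2 ≤ b := Nat.div_le_self _ _
    rcases Nat.eq_zero_or_pos a with ha | ha
    · have : b / 2 < b := Nat.div_lt_self (by omega) (by omega)
      omega
    · have : a / 2 < a := Nat.div_lt_self (by omega) (by omega)
      omega

def pvShiftN : Nat → Nat → Nat
  | m, 0 => m
  | m, k + 1 => pvShiftN (m / 2) k

lemma pvDistN_self (a : Nat) : pvDistN a a = 0 := by
  rw [pvDistN]; simp

lemma pvDistN_left {a b : Nat} (h : b < a) : pvDistN a b = pvDistN (a / 2) b + 1 := by
  rw [pvDistN]; rw [dif_neg (by omega), dif_pos h]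

lemma pvDistN_right {a b : Nat} (h : a < b) : pvDistN a b = pvDistN a (b / 2) + 1 := by
  rw [pvDistN]; rw [dif_neg (by omega), dif_neg (by omega)]

lemma pvJDistN_self (a : Nat) : pvJDistN a a = 0 := by
  rw [pvJDistN]; simp

lemma pvJDistN_step {a b : Nat} (h : a ≠ b) : pvJDistN a b = pvJDistN (a / 2) (b / 2) + 1 := by
  rw [pvJDistN]; rw [dif_neg h]

-- Python bit_length on a Nat
def pvBL (m : Nat) : Nat := PySem.Int.bitLength (m : Int)

lemma pvBL_zero : pvBL 0 = 0 := PySem.Int.bitLength_zero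

lemma pvBL_succ (m : Nat) (h : m ≠ 0) : pvBL m = pvBL (m / 2) + 1 :=
  PySem.Int.bitLength_natCast (by omega)

lemma pvBL_pos (m : Nat) (h : m ≠ 0) : 0 < pvBL m := by
  rw [pvBL_succ m h]; omega

lemma pvBL_lt (m : Nat) : m < 2 ^ pvBL m := by
  have := PySem.Int.lt_two_pow_bitLength (m : Int)
  simpa [pvBL] using this

lemma pvBL_le (m : Nat) (h : m ≠ 0) : 2 ^ (pvBL m - 1) ≤ m := by
  have := PySem.Int.two_pow_bitLength_le (m : Int) (by exact_mod_cast h)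
  simpa [pvBL] using this

-- depth comparison: smaller bit_length means smaller value
lemma pvBL_mono (a b : Nat) (h : pvBL b < pvBL a) : b < a := by
  have ha : a ≠ 0 := by
    intro h0; rw [h0, pvBL_zero] at h; omega
  have h1 : b < 2 ^ pvBL b := pvBL_lt b
  have h2 : 2 ^ (pvBL a - 1) ≤ a := pvBL_le a ha
  have h3 : (2 : Nat) ^ pvBL b ≤ 2 ^ (pvBL a - 1) :=
    Nat.pow_le_pow_right (by omega) (by omega)
  omega

-- the central algebraic fact relating A's interleaved descent to B's align-then-joint descent
lemma pvMain : ∀ N a b, a + b ≤ N →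
    pvDistN a b = (pvBL a - pvBL b) + (pvBL b - pvBL a)
      + 2 * pvJDistN (pvShiftN a (pvBL a - pvBL b)) (pvShiftN b (pvBL b - pvBL a)) := by
  intro N
  induction N with
  | zero =>
    intro a b hab
    have ha : a = 0 := by omega
    have hb : b = 0 := by omega
    subst ha; subst hb
    simp [pvDistN_self, pvJDistN_self, pvShiftN]
  | succ N ih =>
    intro a b hab
    by_cases heq : a = b
    · subst heq
      simp [pvDistN_self, pvJDistN_self, pvShiftN]
    · rcases Nat.lt_trichotomy (pvBL a) (pvBL b) with hlt | heqbl | hgt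
      · -- b is deeper: A halves b
        have hba : a < b := pvBL_mono b a hlt
        have hbne : b ≠ 0 := by omega
        have hbl2 : pvBL b = pvBL (b / 2) + 1 := pvBL_succ b hbne
        have hb2 : b / 2 < b := Nat.div_lt_self (by omega) (by omega)
        have ihr := ih a (b / 2) (by omega)
        rw [pvDistN_right hba, ihr]
        have hk : pvBL b - pvBL a = (pvBL (b / 2) - pvBL a) + 1 := by omega
        rw [hk]
        have hsh : pvShiftN b ((pvBL (b / 2) - pvBL a) + 1)
            = pvShiftN (b / 2) (pvBL (b / 2) - pvBL a) := rfl
        rw [hsh]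
        have h1 : pvBL a - pvBL b = 0 := by omega
        have h2 : pvBL a - pvBL (b / 2) = 0 := by omega
        rw [h1, h2]
        omega
      · -- equal depths, unequal values: both nonzero; A halves the larger, which then
        -- becomes shallower, and one more application of ih closes a joint step
        have ha0 : a ≠ 0 := by
          intro h0
          apply heq
          rw [h0] at heqbl ⊢
          rw [pvBL_zero] at heqbl
          by_contra hb0
          have := pvBL_pos b (by omega)
          omega
        have hb0 : b ≠ 0 := by
          intro h0
          apply heq
          rw [h0] at heqbl ⊢
          rw [pvBL_zero] at heqbl
          have := pvBL_pos a ha0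
          omega
        have hsa : pvBL a = pvBL (a / 2) + 1 := pvBL_succ a ha0
        have hsb : pvBL b = pvBL (b / 2) + 1 := pvBL_succ b hb0
        have hz1 : pvBL a - pvBL b = 0 := by omega
        have hz2 : pvBL b - pvBL a = 0 := by omega
        rw [hz1, hz2]
        simp only [pvShiftN]
        rcases Nat.lt_trichotomy a b with hab' | hab' | hab'
        · -- A halves b
          have hb2 : b / 2 < b := Nat.div_lt_self (by omega) (by omega)
          have ihr := ih a (b / 2) (by omega)
          rw [pvDistN_right hab', ihr]
          have h1 : pvBL a - pvBL (b / 2) = 1 := by omega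
          have h2 : pvBL (b / 2) - pvBL a = 0 := by omega
          rw [h1, h2]
          have hsh1 : pvShiftN a 1 = a / 2 := rfl
          have hsh0 : ∀ m, pvShiftN m 0 = m := fun m => rfl
          rw [hsh1, hsh0]
          rw [pvJDistN_step heq]
          omega
        · omega
        · -- A halves a
          have ha2 : a / 2 < a := Nat.div_lt_self (by omega) (by omega)
          have ihr := ih (a / 2) b (by omega)
          rw [pvDistN_left hab', ihr]
          have h1 : pvBL b - pvBL (a / 2) = 1 := by omega
          have h2 : pvBL (a / 2) - pvBL b = 0 := by omega
          rw [h1, h2]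
          have hsh1 : pvShiftN b 1 = b / 2 := rfl
          have hsh0 : ∀ m, pvShiftN m 0 = m := fun m => rfl
          rw [hsh1, hsh0]
          rw [pvJDistN_step heq]
          omega
      · -- a is deeper: A halves a
        have hba : b < a := pvBL_mono a b hgt
        have hane : a ≠ 0 := by omega
        have hbl2 : pvBL a = pvBL (a / 2) + 1 := pvBL_succ a hane
        have ha2 : a / 2 < a := Nat.div_lt_self (by omega) (by omega)
        have ihr := ih (a / 2) b (by omega)
        rw [pvDistN_left hba, ihr]
        have hk : pvBL a - pvBL b = (pvBL (a / 2) - pvBL b) + 1 := by omega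
        rw [hk]
        have hsh : pvShiftN a ((pvBL (a / 2) - pvBL b) + 1)
            = pvShiftN (a / 2) (pvBL (a / 2) - pvBL b) := rfl
        rw [hsh]
        have h1 : pvBL b - pvBL a = 0 := by omega
        have h2 : pvBL b - pvBL (a / 2) = 0 := by omega
        rw [h1, h2]
        omega

-- arithmetic bridges between the Int ports and the Nat spec functions
lemma pvFloordiv_nat (m : Nat) : PySem.Int.floordiv (m : Int) 2 = ((m / 2 : Nat) : Int) := by
  exact_mod_cast PySem.Int.floordiv_natCast m 2

lemma pvShr_nat (m : Nat) : (m : Int) >>> 1 = ((m / 2 : Nat) : Int) := by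
  rw [show ((m / 2 : Nat)) = m >>> 1 from (Nat.shiftRight_one m).symm]
  exact (Int.natCast_shiftRight m 1).symm

lemma pvLoopA_spec : ∀ (f : Nat) (a b : Nat) (t : Int), a + b < f →
    pvLoopA (a : Int) (b : Int) t f = t + (pvDistN a b : Int) := by
  intro f
  induction f with
  | zero => intro a b t h; omega
  | succ f ih =>
    intro a b t h
    rw [pvLoopA]
    by_cases heq : (a : Int) = (b : Int)
    · have hab : a = b := by exact_mod_cast heq
      subst hab
      rw [if_pos rfl, pvDistN_self]
      simp
    · rw [if_neg heq]
      have hne : a ≠ b := fun hc => heq (by exact_mod_cast hc)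
      by_cases hgt : (a : Int) > (b : Int)
      · have hba : b < a := by exact_mod_cast hgt
        rw [if_pos hgt, pvFloordiv_nat]
        have ha2 : a / 2 < a := Nat.div_lt_self (by omega) (by omega)
        rw [ih (a / 2) b (t + 1) (by omega)]
        rw [pvDistN_left hba]
        push_cast
        ring
      · have hba : ¬ b < a := fun hc => hgt (by exact_mod_cast hc)
        rw [if_neg hgt, pvFloordiv_nat]
        have hb2 : b / 2 < b := Nat.div_lt_self (by omega) (by omega)
        rw [ih a (b / 2) (t + 1) (by omega)]
        have hab : a < b := by omega
        conv_rhs => rw [pvDistN_right hab]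
        push_cast
        ring

lemma pvLoopB_spec : ∀ (f : Nat) (a b : Nat) (s : Int), a + b < f →
    pvLoopB (a : Int) (b : Int) s f = s + (pvJDistN a b : Int) := by
  intro f
  induction f with
  | zero => intro a b s h; omega
  | succ f ih =>
    intro a b s h
    rw [pvLoopB]
    by_cases heq : (a : Int) = (b : Int)
    · have hab : a = b := by exact_mod_cast heq
      subst hab
      rw [if_pos rfl, pvJDistN_self]
      simp
    · rw [if_neg heq]
      have hne : a ≠ b := fun hc => heq (by exact_mod_cast hc)
      rw [pvShr_nat a, pvShr_nat b]
      have hd : a / 2 + b / 2 < f := by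
        have h2 : a / 2 ≤ a := Nat.div_le_self _ _
        have h3 : b / 2 ≤ b := Nat.div_le_self _ _
        rcases Nat.eq_zero_or_pos a with ha | ha
        · have : b / 2 < b := Nat.div_lt_self (by omega) (by omega)
          omega
        · have : a / 2 < a := Nat.div_lt_self (by omega) (by omega)
          omega
      rw [ih (a / 2) (b / 2) (s + 1) hd]
      rw [pvJDistN_step hne]
      push_cast
      ring

lemma pvShiftDown_nat : ∀ (k : Nat) (m : Nat),
    pvShiftDown (m : Int) k = ((pvShiftN m k : Nat) : Int) := by
  intro k
  induction k with
  | zero => intro m; rfl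
  | succ k ih =>
    intro m
    rw [pvShiftDown, pvShr_nat m, ih (m / 2)]
    rfl

lemma pvShiftN_le : ∀ (k : Nat) (m : Nat), pvShiftN m k ≤ m := by
  intro k
  induction k with
  | zero => intro m; exact Nat.le_refl m
  | succ k ih =>
    intro m
    calc pvShiftN (m / 2) k ≤ m / 2 := ih (m / 2)
      _ ≤ m := Nat.div_le_self _ _

-- per-query agreement on nonnegative pairs
lemma pvGo_eq (q : List Int) (h2 : q.length = 2) (hnn : ∀ x ∈ q, 0 ≤ x) :
    pvGoA q = pvGoB q := by
  match q, h2 with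
  | [a, b], _ =>
    have ha : 0 ≤ a := hnn a (by simp)
    have hb : 0 ≤ b := hnn b (by simp)
    obtain ⟨A, rfl⟩ : ∃ A : Nat, a = (A : Int) := ⟨a.toNat, by omega⟩
    obtain ⟨B, rfl⟩ : ∃ B : Nat, b = (B : Int) := ⟨b.toNat, by omega⟩
    have hblA : pvBL A = PySem.Int.bitLength (A : Int) := rfl
    have hblB : pvBL B = PySem.Int.bitLength (B : Int) := rfl
    have hmain := pvMain (A + B) A B (Nat.le_refl _)
    rw [pvGoA, pvGoB]
    simp only [Int.natAbs_natCast]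
    rw [pvLoopA_spec (A + B + 1) A B 1 (by omega)]
    rw [← hblA, ← hblB]
    by_cases hgt : pvBL A > pvBL B
    · rw [if_pos hgt]
      have hz : pvBL B - pvBL A = 0 := by omega
      rw [hz] at hmain
      simp only [pvShiftN] at hmain
      rw [pvShiftDown_nat]
      have hle := pvShiftN_le (pvBL A - pvBL B) A
      rw [pvLoopB_spec (A + B + 1) (pvShiftN A (pvBL A - pvBL B)) B 0 (by omega)]
      rw [hmain]
      push_cast
      ring
    · rw [if_neg hgt]
      have hz : pvBL A - pvBL B = 0 := by omega
      rw [hz] at hmain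
      simp only [pvShiftN] at hmain
      rw [pvShiftDown_nat]
      have hle := pvShiftN_le (pvBL B - pvBL A) B
      rw [pvLoopB_spec (A + B + 1) A (pvShiftN B (pvBL B - pvBL A)) 0 (by omega)]
      rw [hmain]
      push_cast
      ring

-- ===== VERDICT (by name: the statement is the Claim_ definition above) =====
theorem cycleLengthQueries_spec : Claim_equal_cycleLengthQueries := by
  intro n queries _hdom hpre
  unfold Spec_cycleLengthQueries cycleLengthQueries cycleLengthQueries_alt
  have hfold := PySem.List.foldl_append_singleton_eq_map pvGoA queries ([] : List Int)
  simp only [List.nil_append] at hfold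
  rw [hfold]
  apply List.map_congr_left
  intro q hq
  exact pvGo_eq q (hpre q hq).1 (hpre q hq).2
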